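-- pv_equiv track=rewrite | github.com/leoYzj/Math_behind_Signal_and_System | scripts/join_tex_paragraphs.py | has_unescaped_percent
-- ===== SOURCE A (Python) =====
-- def has_unescaped_percent(s: str) -> bool:
--     # returns True if there's an unescaped % in the string
--     i = 0
--     while True:
--         idx = s.find('%', i)
--         if idx == -1:
--             return False
--         # count number of backslashes directly preceding it
--         backslashes = 0
--         j = idx - 1
--         while j >= 0 and s[j] == '\\':
--             backslashes += 1
--             j -= 1
--         if backslashes % 2 == 0:  # even number of backslashes => % is not escaped
--             return True
--         else:
--             i = idx + 1
-- ===== SOURCE B (Python) =====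
-- def has_unescaped_percent(s: str) -> bool:
--     # single forward pass keeping a running count of consecutive preceding backslashes
--     bs = 0
--     for c in s:
--         if c == '\\':
--             bs += 1
--         elif c == '%':
--             if bs % 2 == 0:
--                 return True
--             bs = 0
--         else:
--             bs = 0
--     return False
-- ===== Notes on version B (the rewrite author's own statement) =====
-- stated objective: simpler
-- what changed: Replaced the repeated find()-then-backward-scan loop with a single forward pass that threads a running count of consecutive preceding backslashes.
import Mathlib
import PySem

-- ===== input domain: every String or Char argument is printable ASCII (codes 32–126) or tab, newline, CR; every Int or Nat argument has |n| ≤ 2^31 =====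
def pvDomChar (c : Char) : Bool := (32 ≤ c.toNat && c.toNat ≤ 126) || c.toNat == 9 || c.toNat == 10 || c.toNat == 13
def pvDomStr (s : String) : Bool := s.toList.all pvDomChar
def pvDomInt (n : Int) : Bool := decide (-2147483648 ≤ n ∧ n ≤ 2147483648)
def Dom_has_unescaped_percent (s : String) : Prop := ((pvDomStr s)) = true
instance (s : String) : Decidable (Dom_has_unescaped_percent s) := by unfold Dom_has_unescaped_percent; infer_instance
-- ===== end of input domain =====

-- B replaces A's repeated find()+backward-scan with one forward pass carrying a running backslash count (simpler decomposition).


-- ===== PORT A =====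
-- inner while loop: count backslashes directly preceding position j+1, scanning backwards
def pvCountBack (cs : List Char) (j : Int) (acc : Nat) : Nat :=
  if h : 0 ≤ j ∧ PySem.List.pyGetD cs j ' ' = '\\' then
    pvCountBack cs (j - 1) (acc + 1)
  else acc
  termination_by (j + 1).toNat
  decreasing_by omega

-- outer while True loop of A, with i the search start (the dite guard only ensures termination)
def pvLoopA (cs : List Char) (i : Nat) : Bool :=
  let idx := PySem.Chars.findFrom cs ['%'] (i : Int) none
  if idx = -1 then false
  else
    let backslashes := pvCountBack cs (idx - 1) 0
    if backslashes % 2 = 0 then true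
    else
      if h2 : i < idx.toNat + 1 ∧ idx.toNat + 1 ≤ cs.length then
        pvLoopA cs (idx.toNat + 1)
      else false
  termination_by cs.length - i
  decreasing_by omega

def has_unescaped_percent (s : String) : Bool := pvLoopA s.toList 0

-- ===== PORT B =====
-- forward state machine: bs = number of consecutive backslashes directly before the current char
def pvScanB : List Char → Nat → Bool
  | [], _ => false
  | c :: rest, bs =>
    if c = '\\' then pvScanB rest (bs + 1)
    else if c = '%' then
      if bs % 2 = 0 then true else pvScanB rest 0
    else pvScanB rest 0

def has_unescaped_percent_alt (s : String) : Bool := pvScanB s.toList 0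

-- ===== PRECONDITION & SPEC =====
def Spec_has_unescaped_percent (s : String) (out : Bool) : Prop := out = has_unescaped_percent_alt s
instance (s : String) (out : Bool) : Decidable (Spec_has_unescaped_percent s out) := by unfold Spec_has_unescaped_percent; infer_instance

-- ===== CLAIM (what is proved, stated in full; the proofs are below) =====
def Claim_equal_has_unescaped_percent : Prop := ∀ (s : String), Dom_has_unescaped_percent s → Spec_has_unescaped_percent s (has_unescaped_percent s)

-- ===== LEMMAS AND PROOFS =====

-- length of the run of backslashes at the end of p
def pvTrailRun (p : List Char) : Nat := (p.reverse.takeWhile (fun c => c = '\\')).length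

theorem pvTrailRun_append (p : List Char) (c : Char) :
    pvTrailRun (p ++ [c]) = if c = '\\' then pvTrailRun p + 1 else 0 := by
  simp [pvTrailRun, List.takeWhile]
  split_ifs <;> simp_all

theorem pvCountBack_eq (cs : List Char) (k : Nat) (acc : Nat) (hk : k ≤ cs.length) :
    pvCountBack cs ((k : Int) - 1) acc = acc + pvTrailRun (cs.take k) := by
  induction k generalizing acc with
  | zero => rw [pvCountBack]; simp [pvTrailRun]
  | succ k ih =>
    have hlt : k < cs.length := by omega
    rw [pvCountBack]
    have hcast : (((k + 1 : Nat)) : Int) - 1 = (k : Int) + 1 - 1 := by push_cast; ring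
    rw [hcast]
    have hget : PySem.List.pyGetD cs ((k : Int) + 1 - 1) ' ' = cs[k] := by
      have h1 : ((k : Int) + 1 - 1) = (k : Int) := by omega
      rw [h1, PySem.List.pyGetD_natCast]
      simp [List.getD, List.getElem?_eq_getElem hlt]
    have htake : cs.take (k + 1) = cs.take k ++ [cs[k]] :=
      List.take_succ_eq_append_getElem hlt
    by_cases hb : cs[k] = '\\'
    · have : (0 : Int) ≤ (k : Int) + 1 - 1 ∧ PySem.List.pyGetD cs ((k : Int) + 1 - 1) ' ' = '\\' := by
        constructor; omega; rw [hget, hb]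
      rw [dif_pos this]
      have harg : ((k : Int) + 1 - 1 - 1) = (k : Int) - 1 := by omega
      rw [harg, ih (acc + 1) (by omega), htake, pvTrailRun_append, if_pos hb]
      omega
    · have : ¬ ((0 : Int) ≤ (k : Int) + 1 - 1 ∧ PySem.List.pyGetD cs ((k : Int) + 1 - 1) ' ' = '\\') := by
        rintro ⟨-, h2⟩; rw [hget] at h2; exact hb h2
      rw [dif_neg this, htake, pvTrailRun_append, if_neg hb]
      omega

theorem pvScanB_no_percent (l : List Char) (bs : Nat) (h : '%' ∉ l) : pvScanB l bs = false := by
  induction l generalizing bs with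
  | nil => rfl
  | cons c rest ih =>
    simp only [List.mem_cons, not_or] at h
    simp only [pvScanB]
    have hc : ¬ c = '%' := fun hc => h.1 hc.symm
    by_cases hb : c = '\\'
    · rw [if_pos hb]; exact ih _ h.2
    · rw [if_neg hb, if_neg hc]; exact ih _ h.2

theorem pvScanB_step (cs : List Char) (i : Nat) (hi : i < cs.length) (hc : cs[i] ≠ '%') :
    pvScanB (cs.drop i) (pvTrailRun (cs.take i)) =
    pvScanB (cs.drop (i + 1)) (pvTrailRun (cs.take (i + 1))) := by
  have hdrop : cs.drop i = cs[i] :: cs.drop (i + 1) := List.drop_eq_getElem_cons hi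
  have htake : cs.take (i + 1) = cs.take i ++ [cs[i]] :=
    List.take_succ_eq_append_getElem hi
  rw [hdrop, htake, pvTrailRun_append]
  by_cases hb : cs[i] = '\\'
  · simp [pvScanB, hb]
  · simp [pvScanB, hb, hc]

theorem pvScanB_walk (cs : List Char) (i k : Nat) (hik : i ≤ k) (hk : k ≤ cs.length)
    (hnp : ∀ j, i ≤ j → j < k → (h : j < cs.length) → cs[j] ≠ '%') :
    pvScanB (cs.drop i) (pvTrailRun (cs.take i)) =
    pvScanB (cs.drop k) (pvTrailRun (cs.take k)) := by
  induction k with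
  | zero =>
    have h0 : i = 0 := by omega
    subst h0; rfl
  | succ k ih =>
    rcases Nat.eq_or_lt_of_le hik with h | h
    · rw [h]
    · have hk' : k < cs.length := by omega
      rw [ih (by omega) (by omega) (fun j hj1 hj2 h3 => hnp j hj1 (by omega) h3)]
      exact pvScanB_step cs k hk' (hnp k (by omega) (by omega) hk')

theorem pvLoopA_eq (cs : List Char) (i : Nat) (hi : i ≤ cs.length) :
    pvLoopA cs i = pvScanB (cs.drop i) (pvTrailRun (cs.take i)) := by
  rw [pvLoopA]
  set idx := PySem.Chars.findFrom cs ['%'] (i : Int) none with hidx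
  by_cases hfound : idx = -1
  · -- no '%' from i on
    rw [if_pos hfound]
    have hnp : ¬ ['%'] <:+: cs.drop i :=
      (PySem.Chars.findFrom_natCast_eq_neg_one_iff cs ['%'] i hi).mp (hidx ▸ hfound)
    have hmem : '%' ∉ cs.drop i := fun hm =>
      hnp ((List.singleton_infix_iff '%' (cs.drop i)).mpr hm)
    exact (pvScanB_no_percent _ _ hmem).symm
  · rw [if_neg hfound]
    obtain ⟨hle, hpre, hfirst⟩ := PySem.Chars.findFrom_natCast_spec cs ['%'] i hi (hidx ▸ hfound)
    rw [← hidx] at hle hpre hfirst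
    have hge0 : 0 ≤ idx := le_trans (by omega) hle
    have hilt : i ≤ idx.toNat := by omega
    have hidxlt : idx.toNat < cs.length := by
      by_contra hcon
      have : cs.drop idx.toNat = [] := List.drop_eq_nil_of_le (by omega)
      rw [this] at hpre
      simpa using hpre.length_le
    have hat : cs[idx.toNat] = '%' := by
      obtain ⟨t, ht⟩ := hpre
      rw [List.drop_eq_getElem_cons hidxlt] at ht
      simp only [List.singleton_append, List.cons.injEq] at ht
      exact ht.1.symm
    have hnpj : ∀ j, i ≤ j → j < idx.toNat → (h : j < cs.length) → cs[j] ≠ '%' := by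
      intro j hj1 hj2 h3 hjp
      apply hfirst j (by exact_mod_cast hj1) (by omega)
      have hd : cs.drop j = cs[j] :: cs.drop (j + 1) := List.drop_eq_getElem_cons h3
      rw [hd, hjp]
      exact ⟨_, rfl⟩
    -- walk B from i to idx.toNat
    rw [pvScanB_walk cs i idx.toNat hilt (by omega) hnpj]
    have hd : cs.drop idx.toNat = '%' :: cs.drop (idx.toNat + 1) := by
      rw [List.drop_eq_getElem_cons hidxlt, hat]
    -- backward count = trailing run
    have hcount : pvCountBack cs (idx - 1) 0 = pvTrailRun (cs.take idx.toNat) := by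
      have : idx - 1 = (idx.toNat : Int) - 1 := by omega
      rw [this, pvCountBack_eq cs idx.toNat 0 (by omega)]
      omega
    rw [hd, hcount]
    by_cases heven : pvTrailRun (cs.take idx.toNat) % 2 = 0
    · rw [if_pos heven]
      simp [pvScanB, heven]
    · have hg : i < idx.toNat + 1 ∧ idx.toNat + 1 ≤ cs.length := ⟨by omega, by omega⟩
      rw [if_neg heven, dif_pos hg, pvLoopA_eq cs (idx.toNat + 1) (by omega)]
      have htk : pvTrailRun (cs.take (idx.toNat + 1)) = 0 := by
        rw [List.take_succ_eq_append_getElem hidxlt, pvTrailRun_append, hat]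
        simp
      rw [htk]
      simp [pvScanB, heven]
  termination_by cs.length - i
  decreasing_by omega

-- ===== VERDICT (by name: the statement is the Claim_ definition above) =====
theorem has_unescaped_percent_spec : Claim_equal_has_unescaped_percent := by
  intro s _
  unfold Spec_has_unescaped_percent has_unescaped_percent has_unescaped_percent_alt
  rw [pvLoopA_eq s.toList 0 (by omega)]
  simp [pvTrailRun]
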